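-- pv_equiv track=rewrite | github.com/Famvazpom/tutor | tutor/sistema_experto/Assess/NumericInputAssess.py | es_numero
-- ===== SOURCE A (Python) =====
-- def es_numero(cad):
--     if cad.count('.')>1:
--         return False
--     ncad = cad
--     ncad = ncad.replace('.','')
--     nums = ['0', '1', '2', '3', '4', '5', '6', '7', '8', '9']
--
--     for i,c in enumerate(ncad):
--         if i > 0:
--             if not c in nums:
--                 return False
--         elif (not c in nums) and c != '-':
--             return False
--     return True
-- ===== SOURCE B (Python) =====
-- def es_numero(cad):
--     # single left-to-right pass: a tiny state machine over the raw string,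
--     # tracking how many dots were consumed and whether a sign/digit was consumed
--     dots = 0
--     seen = False  # True once a non-dot character has been consumed
--     for c in cad:
--         if c == '.':
--             dots += 1
--             if dots > 1:
--                 return False
--         elif '0' <= c <= '9':
--             seen = True
--         elif c == '-' and not seen:
--             seen = True
--         else:
--             return False
--     return True
-- ===== Notes on version B (the rewrite author's own statement) =====
-- stated objective: alternative
-- what changed: Replaces A's three staged passes (count dots, strip dots via replace, then an index-branched loop over the stripped string) with a single left-to-right finite-state scan over the original string whose state is the dot count and a seen-sign-or-digit flag.
import Mathlib
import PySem

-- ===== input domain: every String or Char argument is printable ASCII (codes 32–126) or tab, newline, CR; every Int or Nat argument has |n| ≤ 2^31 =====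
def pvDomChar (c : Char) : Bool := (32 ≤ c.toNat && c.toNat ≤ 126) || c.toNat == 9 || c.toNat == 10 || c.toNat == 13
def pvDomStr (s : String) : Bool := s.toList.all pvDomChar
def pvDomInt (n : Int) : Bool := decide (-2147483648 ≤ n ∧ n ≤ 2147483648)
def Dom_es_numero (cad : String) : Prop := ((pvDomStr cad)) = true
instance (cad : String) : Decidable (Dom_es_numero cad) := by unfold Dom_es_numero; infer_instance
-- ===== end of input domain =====

-- B replaces A's staged passes (dot count, dot-strip via replace, indexed loop) by a single-pass state machine over the original string (alternative; same cost).


-- ===== PORT A =====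
def pvNums : List Char := ['0','1','2','3','4','5','6','7','8','9']

def pvLoopA : List (Int × Char) → Bool
  | [] => true
  | (i, c) :: rest =>
    if i > 0 then
      if ¬ (c ∈ pvNums) then false else pvLoopA rest
    else if (¬ (c ∈ pvNums)) ∧ c ≠ '-' then false else pvLoopA rest

def es_numero (cad : String) : Bool :=
  if PySem.Str.count cad "." > 1 then false
  else pvLoopA (PySem.List.enumerate (PySem.Chars.replace cad.toList ['.'] []))

-- ===== PORT B =====
-- Source B's single-pass scan with state (dots, seen)
def pvLoopB : List Char → Int → Bool → Bool
  | [], _, _ => true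
  | c :: t, dots, seen =>
    if c = '.' then
      if dots + 1 > 1 then false else pvLoopB t (dots + 1) seen
    else if '0' ≤ c ∧ c ≤ '9' then pvLoopB t dots true
    else if c = '-' ∧ seen = false then pvLoopB t dots true
    else false

def es_numero_alt (cad : String) : Bool := pvLoopB cad.toList 0 false

-- ===== PRECONDITION & SPEC =====
def Spec_es_numero (cad : String) (out : Bool) : Prop := out = es_numero_alt cad
instance (cad : String) (out : Bool) : Decidable (Spec_es_numero cad out) := by unfold Spec_es_numero; infer_instance

-- ===== CLAIM (what is proved, stated in full; the proofs are below) =====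
def Claim_equal_es_numero : Prop := ∀ (cad : String), Dom_es_numero cad → Spec_es_numero cad (es_numero cad)

-- ===== LEMMAS AND PROOFS =====

def pvDigit (c : Char) : Bool := decide ('0' ≤ c ∧ c ≤ '9')

-- the match on the dot-stripped string after the first position
def pvTailOK (s : List Char) : Bool := s.all pvDigit

-- the match on the whole dot-stripped string (optional leading '-')
def pvHeadOK : List Char → Bool
  | [] => true
  | c :: t => if c = '-' then pvTailOK t else pvDigit c && pvTailOK t

lemma mem_pvNums_iff (c : Char) : c ∈ pvNums ↔ ('0' ≤ c ∧ c ≤ '9') := by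
  have hv : ∀ d : Char, c = d ↔ c.toNat = d.toNat := by
    intro d
    constructor
    · rintro rfl; rfl
    · intro h; exact Char.ext (UInt32.toNat_inj.mp h)
  have hle : ∀ d : Char, (d ≤ c ↔ d.toNat ≤ c.toNat) ∧ (c ≤ d ↔ c.toNat ≤ d.toNat) := by
    intro d; exact ⟨UInt32.le_iff_toNat_le .., UInt32.le_iff_toNat_le ..⟩
  simp only [pvNums, List.mem_cons, List.not_mem_nil, or_false, hv, (hle '0').1, (hle '9').2]
  have h0 : ('0':Char).toNat = 48 := rfl
  have h9 : ('9':Char).toNat = 57 := rfl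
  have h1 : ('1':Char).toNat = 49 := rfl
  have h2 : ('2':Char).toNat = 50 := rfl
  have h3 : ('3':Char).toNat = 51 := rfl
  have h4 : ('4':Char).toNat = 52 := rfl
  have h5 : ('5':Char).toNat = 53 := rfl
  have h6 : ('6':Char).toNat = 54 := rfl
  have h7 : ('7':Char).toNat = 55 := rfl
  have h8 : ('8':Char).toNat = 56 := rfl
  omega

lemma count_go_dot (l : List Char) : ∀ (fuel : Nat) (acc : Nat), l.length ≤ fuel →
    PySem.Chars.count.go ['.'] fuel l acc = acc + l.count '.' := by
  induction l with
  | nil => intro fuel acc _; cases fuel <;> simp [PySem.Chars.count.go]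
  | cons c t ih =>
    intro fuel acc h
    match fuel with
    | 0 => simp at h
    | Nat.succ f =>
      rw [PySem.Chars.count.go]
      by_cases hc : c = '.'
      · subst hc
        rw [show List.isPrefixOf ['.'] ('.' :: t) = true by simp [List.isPrefixOf]]
        simp only [if_pos, List.length_cons, List.drop_succ_cons, List.length_nil, List.drop_zero]
        rw [ih f (acc+1) (by simpa using h)]
        simp
        omega
      · rw [show List.isPrefixOf ['.'] (c :: t) = false by
          simp [List.isPrefixOf]; exact fun h => hc h.symm]
        simp only [Bool.false_eq_true, if_false]
        rw [ih f acc (by simpa using h)]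
        simp [hc]

lemma count_dot (l : List Char) : PySem.Chars.count l ['.'] = l.count '.' := by
  rw [PySem.Chars.count]
  simp only [List.isEmpty_cons, Bool.false_eq_true, if_false]
  simpa using count_go_dot l l.length 0 le_rfl

lemma replace_go_dot (l : List Char) : ∀ (fuel : Nat) (acc : List Char), l.length ≤ fuel →
    PySem.Chars.replace.go ['.'] [] fuel l acc = acc.reverse ++ l.filter (· ≠ '.') := by
  induction l with
  | nil => intro fuel acc _; cases fuel <;> simp [PySem.Chars.replace.go]
  | cons c t ih =>
    intro fuel acc h
    match fuel with
    | 0 => simp at h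
    | Nat.succ f =>
      rw [PySem.Chars.replace.go]
      by_cases hc : c = '.'
      · subst hc
        rw [show List.isPrefixOf ['.'] ('.' :: t) = true by simp [List.isPrefixOf]]
        simp only [if_pos, List.length_cons, List.drop_succ_cons, List.length_nil, List.drop_zero,
          List.reverse_nil, List.nil_append]
        rw [ih f acc (by simpa using h)]
        simp
      · rw [show List.isPrefixOf ['.'] (c :: t) = false by
          simp [List.isPrefixOf]; exact fun h => hc h.symm]
        simp only [Bool.false_eq_true, if_false]
        rw [ih f (c :: acc) (by simpa using h)]
        simp [hc]

lemma replace_dot (l : List Char) :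
    PySem.Chars.replace l ['.'] [] = l.filter (· ≠ '.') := by
  rw [PySem.Chars.replace]
  simp only [List.isEmpty_cons, Bool.false_eq_true, if_false]
  simpa using replace_go_dot l l.length [] le_rfl

lemma pvLoopA_tail (l : List Char) (k : Int) (hk : 0 < k) :
    pvLoopA (PySem.List.enumerate l k) = pvTailOK l := by
  induction l generalizing k with
  | nil => simp [PySem.List.enumerate_nil, pvLoopA, pvTailOK]
  | cons c t ih =>
    simp only [PySem.List.enumerate_cons, pvLoopA]
    rw [if_pos hk]
    by_cases h : c ∈ pvNums
    · have hd : pvDigit c = true := by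
        simpa [pvDigit] using (mem_pvNums_iff c).mp h
      rw [if_neg (by simp [h]), ih (k+1) (by omega)]
      simp [pvTailOK, hd]
    · have hd : pvDigit c = false := by
        simp only [pvDigit, decide_eq_false_iff_not]
        exact fun hb => h ((mem_pvNums_iff c).mpr hb)
      simp [h, pvTailOK, hd]

lemma pvLoopA_head (l : List Char) :
    pvLoopA (PySem.List.enumerate l) = pvHeadOK l := by
  cases l with
  | nil => simp [PySem.List.enumerate_nil, pvLoopA, pvHeadOK]
  | cons c t =>
    simp only [PySem.List.enumerate_cons, pvLoopA, pvHeadOK]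
    rw [if_neg (by omega : ¬ ((0:Int) > 0))]
    by_cases hm : c = '-'
    · subst hm
      rw [if_neg (by simp), pvLoopA_tail t (0+1) (by omega), if_pos rfl]
    · by_cases h : c ∈ pvNums
      · have hd : pvDigit c = true := by
          simpa [pvDigit] using (mem_pvNums_iff c).mp h
        rw [if_neg (by simp [h]), pvLoopA_tail t (0+1) (by omega)]
        simp [hm, hd]
      · have hd : pvDigit c = false := by
          simp only [pvDigit, decide_eq_false_iff_not]
          exact fun hb => h ((mem_pvNums_iff c).mpr hb)
        rw [if_pos ⟨h, hm⟩]
        simp [hm, hd]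

lemma pvLoopB_char (l : List Char) : ∀ (dots : Int) (seen : Bool), 0 ≤ dots → dots ≤ 1 →
    pvLoopB l dots seen =
      (decide (dots + (l.count '.' : Int) ≤ 1)
        && (if seen then pvTailOK (l.filter (· ≠ '.')) else pvHeadOK (l.filter (· ≠ '.')))) := by
  induction l with
  | nil =>
    intro dots seen _ h1
    simp [pvLoopB, pvTailOK, pvHeadOK, h1]
  | cons c t ih =>
    intro dots seen hd h1
    simp only [pvLoopB]
    by_cases hc : c = '.'
    · subst hc
      rw [if_pos rfl]
      by_cases hgt : dots + 1 > 1
      · rw [if_pos hgt]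
        have : (decide (dots + ((('.' :: t).count '.' : Nat) : Int) ≤ 1)) = false := by
          rw [decide_eq_false_iff_not]
          simp only [List.count_cons_self]
          push_cast
          omega
        rw [this, Bool.false_and]
      · rw [if_neg hgt, ih (dots + 1) seen (by omega) (by omega)]
        have hco : (decide (dots + 1 + ((t.count '.' : Nat) : Int) ≤ 1))
             = (decide (dots + ((('.' :: t).count '.' : Nat) : Int) ≤ 1)) := by
          rw [decide_eq_decide]
          simp only [List.count_cons_self]
          push_cast
          omega
        rw [hco]
        simp
    · have hfil : (c :: t).filter (· ≠ '.') = c :: t.filter (· ≠ '.') := by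
        simp [hc]
      have hcnt : ((c :: t).count '.' : Int) = (t.count '.' : Int) := by
        norm_cast
        simp [hc]
      rw [if_neg hc]
      by_cases hdig : ('0' ≤ c ∧ c ≤ '9')
      · have hdigb : pvDigit c = true := by simp [pvDigit, hdig]
        rw [if_pos hdig, ih dots true hd h1, hfil, hcnt]
        have hne : c ≠ '-' := by
          intro h; subst h; revert hdig; decide
        cases seen <;>
          simp [pvTailOK, pvHeadOK, hdigb, hne]
      · have hdigb : pvDigit c = false := by simp [pvDigit, hdig]
        rw [if_neg hdig]
        by_cases hm : c = '-' ∧ seen = false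
        · obtain ⟨hm1, hm2⟩ := hm
          subst hm1; subst hm2
          rw [if_pos ⟨rfl, rfl⟩, ih dots true hd h1, hfil, hcnt]
          simp [pvHeadOK]
        · rw [if_neg hm, hfil]
          cases seen with
          | true =>
            simp [pvTailOK, hdigb]
          | false =>
            have hne : c ≠ '-' := fun h => hm ⟨h, rfl⟩
            simp [pvHeadOK, hne, hdigb]

-- ===== VERDICT (by name: the statement is the Claim_ definition above) =====
theorem es_numero_spec : Claim_equal_es_numero := by
  intro cad _
  unfold Spec_es_numero es_numero es_numero_alt
  rw [pvLoopB_char _ 0 false le_rfl (by omega)]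
  have hc : PySem.Str.count cad "." = cad.toList.count '.' := by
    simp [PySem.Str.count_eq, count_dot]
  rw [hc]
  by_cases hgt : cad.toList.count '.' > 1
  · rw [if_pos hgt]
    have hdec : (decide ((0 : Int) + (cad.toList.count '.' : Int) ≤ 1)) = false := by
      rw [decide_eq_false_iff_not]; omega
    rw [hdec, Bool.false_and]
  · rw [if_neg hgt]
    have : ((0 : Int) + (cad.toList.count '.' : Int) ≤ 1) := by omega
    simp only [this, decide_true, Bool.true_and, if_neg (Bool.false_ne_true)]
    rw [replace_dot, pvLoopA_head]
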